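-- pv_equiv track=rewrite | github.com/CivicDataLab/flood-data-ecosystem-Odisha | Sources/TENDERS/scripts/block-pincode_extraction.py | extract_tables_from_text
-- ===== SOURCE A (Python) =====
-- def extract_tables_from_text(text):
--     # Split the text into lines
--     lines = text.split('\n')
--
--     # Initialize variables
--     tables = []
--     current_table = []
--
--     # Iterate through lines to identify and extract tables
--     for line in lines:
--         if '|' in line or '+' in line:  # Assuming table rows are separated by | or +
--             current_table.append(line)
--         elif current_table:
--             # We've reached the end of a table
--             if len(current_table) > 1:  # Ensure it's not just a single line
--                 tables.append('\n'.join(current_table))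
--             current_table = []
--
--     # Add any remaining table
--     if current_table and len(current_table) > 1:
--         tables.append('\n'.join(current_table))
--
--     return tables
-- ===== SOURCE B (Python) =====
-- def extract_tables_from_text(text):
--     lines = text.split('\n')
--     tables = []
--     i = 0
--     n = len(lines)
--     while i < n:
--         if '|' in lines[i] or '+' in lines[i]:
--             j = i + 1
--             while j < n and ('|' in lines[j] or '+' in lines[j]):
--                 j += 1
--             if j - i > 1:
--                 tables.append('\n'.join(lines[i:j]))
--             i = j
--         else:
--             i += 1
--     return tables
-- ===== Notes on version B (the rewrite author's own statement) =====
-- stated objective: alternative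
-- what changed: Replaces A's accumulator-and-flush state machine (current_table list, elif-flush, post-loop flush) with a two-pointer run scanner that finds each maximal run of table lines and emits it directly, with no pending-table state to flush.
import Mathlib
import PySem

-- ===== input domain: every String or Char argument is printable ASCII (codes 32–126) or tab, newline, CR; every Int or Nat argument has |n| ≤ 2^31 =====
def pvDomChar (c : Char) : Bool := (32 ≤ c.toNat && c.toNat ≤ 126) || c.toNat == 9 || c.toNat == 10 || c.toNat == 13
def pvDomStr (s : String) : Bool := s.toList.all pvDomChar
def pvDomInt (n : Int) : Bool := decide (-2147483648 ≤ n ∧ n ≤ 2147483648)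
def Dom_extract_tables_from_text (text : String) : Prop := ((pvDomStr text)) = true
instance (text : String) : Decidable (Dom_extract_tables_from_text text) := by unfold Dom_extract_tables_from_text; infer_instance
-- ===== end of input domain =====

-- B replaces A's accumulator-and-flush state machine with a two-pointer run scanner; same return value, no side effects.

-- '|' in line or '+' in line (used verbatim by both Python versions)
def pvIsTableLine (l : String) : Bool :=
  PySem.Str.isIn "|" l || PySem.Str.isIn "+" l

-- ===== PORT A =====
-- the body of A's for-loop, on the state (tables, current_table)
def etaStep (st : List String × List String) (line : String) : List String × List String :=
  if pvIsTableLine line then (st.1, st.2 ++ [line])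
  else if st.2 ≠ [] then
    (if st.2.length > 1 then st.1 ++ [PySem.Str.join "\n" st.2] else st.1, [])
  else st

-- A's post-loop flush of any remaining table
def etaFin (st : List String × List String) : List String :=
  if st.2 ≠ [] ∧ st.2.length > 1 then st.1 ++ [PySem.Str.join "\n" st.2] else st.1

def extract_tables_from_text (text : String) : List String :=
  let lines := (PySem.Str.split? text "\n").getD []   -- text.split('\n'); sep is non-empty so split? is some
  etaFin (lines.foldl etaStep ([], []))

-- ===== PORT B =====
-- the outer while loop of Source B: find a table line, take the maximal run from it, emit if longer than 1
def etbGo : List String → List String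
  | [] => []
  | l :: rest =>
    if pvIsTableLine l then
      let run := l :: rest.takeWhile pvIsTableLine
      (if run.length > 1 then [PySem.Str.join "\n" run] else []) ++
        etbGo (rest.dropWhile pvIsTableLine)
    else etbGo rest
termination_by ls => ls.length
decreasing_by
  · exact Nat.lt_succ_of_le (List.length_dropWhile_le _ _)
  · simp

def extract_tables_from_text_alt (text : String) : List String :=
  etbGo ((PySem.Str.split? text "\n").getD [])

-- ===== PRECONDITION & SPEC =====
def Spec_extract_tables_from_text (text : String) (out : List String) : Prop := out = extract_tables_from_text_alt text
instance (text : String) (out : List String) : Decidable (Spec_extract_tables_from_text text out) := by unfold Spec_extract_tables_from_text; infer_instance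

-- ===== CLAIM (what is proved, stated in full; the proofs are below) =====
def Claim_equal_extract_tables_from_text : Prop := ∀ (text : String), Dom_extract_tables_from_text text → Spec_extract_tables_from_text text (extract_tables_from_text text)

-- ===== LEMMAS AND PROOFS =====

-- emit a finished table run the way both programs do
def pvEmit (cur : List String) : List String :=
  if cur.length > 1 then [PySem.Str.join "\n" cur] else []

-- A's loop, as a recursion carrying only the pending table (tables accumulator factored out)
def etaAux (cur : List String) : List String → List String
  | [] => pvEmit cur
  | l :: rest =>
    if pvIsTableLine l then etaAux (cur ++ [l]) rest
    else pvEmit cur ++ etaAux [] rest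

lemma etaAux_nil_not_table (l : String) (rest : List String) (h : pvIsTableLine l = false) :
    etaAux [] (l :: rest) = etaAux [] rest := by
  simp [etaAux, h, pvEmit]

-- A's foldl from state (acc, cur), followed by the final flush, equals acc ++ etaAux cur
lemma foldl_eq_etaAux (lines : List String) : ∀ (acc cur : List String),
    etaFin (lines.foldl etaStep (acc, cur)) = acc ++ etaAux cur lines := by
  induction lines with
  | nil =>
    intro acc cur
    simp only [List.foldl_nil, etaFin, etaAux, pvEmit]
    rcases cur with _ | ⟨c, cs⟩ <;> split_ifs <;> simp_all
  | cons l rest ih =>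
    intro acc cur
    by_cases h : pvIsTableLine l
    · rw [List.foldl_cons]
      rw [show etaStep (acc, cur) l = (acc, cur ++ [l]) by simp [etaStep, h]]
      rw [ih, etaAux]
      simp [h]
    · have h' : pvIsTableLine l = false := by simpa using h
      rcases cur with _ | ⟨c, cs⟩
      · rw [List.foldl_cons]
        rw [show etaStep (acc, []) l = (acc, []) by simp [etaStep, h']]
        rw [ih, etaAux_nil_not_table l rest h']
      · rw [List.foldl_cons]
        rw [show etaStep (acc, c :: cs) l
              = (acc ++ pvEmit (c :: cs), []) by
            simp only [etaStep, h', Bool.false_eq_true, if_false, pvEmit]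
            split_ifs <;> simp_all]
        rw [ih, etaAux]
        simp [h', List.append_assoc]

-- etaAux flushes cur extended by the maximal table run, then restarts empty after it
lemma etaAux_span (lines : List String) : ∀ (cur : List String),
    etaAux cur lines =
      pvEmit (cur ++ lines.takeWhile pvIsTableLine) ++ etaAux [] (lines.dropWhile pvIsTableLine) := by
  induction lines with
  | nil => intro cur; simp [etaAux, pvEmit]
  | cons l rest ih =>
    intro cur
    by_cases h : pvIsTableLine l
    · simp only [etaAux, h, if_pos, List.takeWhile_cons, List.dropWhile_cons]
      rw [ih (cur ++ [l])]
      simp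
    · have h' : pvIsTableLine l = false := by simpa using h
      simp only [etaAux, h', Bool.false_eq_true, if_false, List.takeWhile_cons, List.dropWhile_cons,
        List.append_nil]
      simp [pvEmit]

-- etaAux from an empty pending table is exactly B's run scanner
lemma etaAux_nil_eq_etbGo (lines : List String) : etaAux [] lines = etbGo lines := by
  induction lines using etbGo.induct with
  | case1 => simp [etaAux, etbGo, pvEmit]
  | case2 l rest h ih =>
    rw [etbGo, if_pos h, etaAux_span]
    simp only [List.takeWhile_cons, List.dropWhile_cons, h, if_pos, List.nil_append]
    rw [ih]
    simp [pvEmit]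
  | case3 l rest h ih =>
    have h' : pvIsTableLine l = false := by simpa using h
    rw [etbGo, if_neg (by simp [h']), ← ih, etaAux_nil_not_table l rest h']

-- ===== VERDICT (by name: the statement is the Claim_ definition above) =====
theorem extract_tables_from_text_spec : Claim_equal_extract_tables_from_text := by
  intro text _
  unfold Spec_extract_tables_from_text extract_tables_from_text extract_tables_from_text_alt
  rw [foldl_eq_etaAux, etaAux_nil_eq_etbGo]
  simp
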